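-- pv_equiv track=rewrite | github.com/Egxon/pol | sobriete-19.py | erase
-- ===== SOURCE A (Python) =====
-- import string
--
-- def erase(message: string):
--
--
--     if message == "": # Am I even real ? No...
--         return message # So I just return myself : the void
--
--         #   So I know that I'm not the void, am I space ?
--     if message[0] != ' ': # Surely not, you are discussing to the wrong person
--         return message[0] + erase(message[1:]) # I enter the Valallah and the purge continues !
--
--         #   Yeah it's me ! The famous and beautiful space char ;)
--     else:
--         if len(message) > 1: # *you look behind* Am I the last one standing ?
--
--                     # Hehe somebody is behind, that's nice
--                 if message[1] == ' ': # IT'S IT ! MY SPACE LOVER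
--                     return '  ' + erase(message[2:]) # WE ENTER THE VALHALLA TOGETHER ! And the purge continues (next episode)...
--                 else: # Oh no, I've lost my space love ...
--                     return erase(message[1:]) # I cannot enter, i'll find it before ! Do not wait me ! And let the purge continue without me !
--
--         else: # Oh no, I've lost my space love ... Nobody is behind me ...
--             return '' # I cannot enter, i'll find it before ! Do not wait me !
-- ===== SOURCE B (Python) =====
-- def erase(message):
--     out = []
--     i = 0
--     n = len(message)
--     while i < n:
--         c = message[i]
--         if c != ' ':
--             out.append(c)
--             i += 1
--         else:
--             j = i
--             while j < n and message[j] == ' ':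
--                 j += 1
--             out.append(' ' * (2 * ((j - i) // 2)))
--             i = j
--     return ''.join(out)
-- ===== Notes on version B (the rewrite author's own statement) =====
-- stated objective: faster
-- what changed: Replaced the character-by-character recursion with quadratic string slicing/concatenation by a single iterative pass that groups each maximal run of spaces and emits an even count of spaces per run.
import Mathlib
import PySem

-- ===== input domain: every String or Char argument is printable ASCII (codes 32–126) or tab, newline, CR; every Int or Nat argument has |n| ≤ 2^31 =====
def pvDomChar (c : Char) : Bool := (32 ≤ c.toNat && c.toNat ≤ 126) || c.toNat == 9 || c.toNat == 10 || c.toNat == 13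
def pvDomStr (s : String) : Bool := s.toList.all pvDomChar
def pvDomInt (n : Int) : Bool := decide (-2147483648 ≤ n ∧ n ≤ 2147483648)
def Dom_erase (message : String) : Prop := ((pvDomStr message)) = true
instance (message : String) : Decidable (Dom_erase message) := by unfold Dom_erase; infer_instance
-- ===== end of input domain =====

-- B replaces A's recursive slicing (O(n^2)) with one linear pass that groups each
-- maximal run of spaces and emits an even number of spaces per run.

-- ===== PORT A =====
-- literal transliteration of A's recursion over the string's characters
def eraseAux : List Char → List Char
  | [] => []
  | c :: cs =>
    if c ≠ ' ' then c :: eraseAux cs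
    else
      match cs with
      | [] => []
      | d :: ds => if d = ' ' then ' ' :: ' ' :: eraseAux ds else eraseAux (d :: ds)

def erase (message : String) : String := String.mk (eraseAux message.toList)

-- ===== PORT B =====
-- length of the leading run of spaces (B's inner while loop)
def spRun : List Char → Nat
  | [] => 0
  | c :: cs => if c = ' ' then spRun cs + 1 else 0

lemma spRun_le (l : List Char) : spRun l ≤ l.length := by
  induction l with
  | nil => simp [spRun]
  | cons c cs ih => simp only [spRun, List.length_cons]; split <;> omega

-- B's outer loop: copy a non-space, or consume a whole space run and emit an even count
def eraseAltAux : List Char → List Char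
  | [] => []
  | c :: cs =>
    if c = ' ' then
      List.replicate (2 * ((spRun cs + 1) / 2)) ' ' ++ eraseAltAux (cs.drop (spRun cs))
    else c :: eraseAltAux cs
termination_by l => l.length
decreasing_by
  · simp only [List.length_drop, List.length_cons]
    have := spRun_le cs; omega
  · simp

def erase_alt (message : String) : String := String.mk (eraseAltAux message.toList)

-- ===== PRECONDITION & SPEC =====
def Spec_erase (message : String) (out : String) : Prop := out = erase_alt message
instance (message : String) (out : String) : Decidable (Spec_erase message out) := by unfold Spec_erase; infer_instance

-- ===== CLAIM (what is proved, stated in full; the proofs are below) =====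
def Claim_equal_erase : Prop := ∀ (message : String), Dom_erase message → Spec_erase message (erase message)

-- ===== LEMMAS AND PROOFS =====

lemma eraseAltAux_two_spaces (ds : List Char) :
    eraseAltAux (' ' :: ' ' :: ds) = ' ' :: ' ' :: eraseAltAux ds := by
  rw [eraseAltAux]
  simp only [spRun, if_true, List.drop_succ_cons]
  cases ds with
  | nil => simp [spRun, eraseAltAux, List.replicate]
  | cons e es =>
    by_cases he : e = ' '
    · subst he
      conv_rhs => rw [eraseAltAux]
      simp only [spRun, if_true, List.drop_succ_cons]
      have h2 : 2 * ((spRun es + 1 + 1 + 1) / 2) = 2 * ((spRun es + 1) / 2) + 2 := by omega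
      rw [h2]
      simp [List.replicate]
    · simp [spRun, he, List.replicate]

lemma eraseAux_eq (l : List Char) : eraseAux l = eraseAltAux l := by
  induction l using eraseAux.induct with
  | case1 => simp [eraseAux, eraseAltAux]
  | case2 c cs hc ih =>
    rw [eraseAux.eq_def, eraseAltAux]
    simp only [if_pos hc, if_neg hc, ih]
  | case3 c hc =>
    simp only [ne_eq, not_not] at hc; subst hc
    simp [eraseAux, eraseAltAux, spRun]
  | case4 c hc ds ih =>
    simp only [ne_eq, not_not] at hc; subst hc
    rw [eraseAux.eq_def]
    simp only [ne_eq, not_true_eq_false, if_false, if_true]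
    rw [eraseAltAux_two_spaces, ih]
  | case5 c hc d ds hd ih =>
    simp only [ne_eq, not_not] at hc; subst hc
    rw [eraseAux.eq_def]
    simp only [ne_eq, not_true_eq_false, if_false, if_neg hd]
    rw [eraseAltAux]
    simp [spRun, hd, ih]

-- ===== VERDICT (by name: the statement is the Claim_ definition above) =====
theorem erase_spec : Claim_equal_erase := by
  intro message _
  unfold Spec_erase erase erase_alt
  rw [eraseAux_eq]
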